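-- pv_equiv track=rewrite | github.com/dagnystahl/RandomizedRounding | RR.py | mathematica_solve
-- ===== SOURCE A (Python) =====
-- def mathematica_solve(sets, weights, n, set_number):
--     # Mathematica uses A.x >= b rather than A.x <= b
--     A = [[1 if j in s else 0 for s in sets] for j in range(1, n+1)]
--     b = [1 for i in range(n)]
--     c = weights
--     lu = [[0, 1] for i in range(set_number)]
--
--     # turns python-style vectors and matrices into mathematica
--     def mize(v):
--         return str(v).replace('[', '{').replace(']', '}')
--
--     return f"""
--         A = {mize(A)};
--         c = {mize(c)};
--         b = {mize(b)};
--         LU = {mize(lu)};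
--         LinearProgramming[c, A, b, LU, Integers]
--     """
-- ===== SOURCE B (Python) =====
-- def mathematica_solve(sets, weights, n, set_number):
--     # Build the constraint matrix densely from the sparse set contents,
--     # and emit Mathematica brace syntax directly (no repr + replace pass).
--     rows = max(n, 0)
--     M = [["0"] * len(sets) for _ in range(rows)]
--     for idx, s in enumerate(sets):
--         for m in s:
--             if 1 <= m <= n:
--                 M[m - 1][idx] = "1"
--
--     def brace(items):
--         return "{" + ", ".join(items) + "}"
--
--     a_str = brace(brace(row) for row in M)
--     c_str = brace(str(w) for w in weights)
--     b_str = brace(["1"] * rows)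
--     lu_str = brace(["{0, 1}"] * max(set_number, 0))
--
--     return f"""
--         A = {a_str};
--         c = {c_str};
--         b = {b_str};
--         LU = {lu_str};
--         LinearProgramming[c, A, b, LU, Integers]
--     """
-- ===== Notes on version B (the rewrite author's own statement) =====
-- stated objective: alternative
-- what changed: B fills a dense 0/1 matrix by walking each set's members once instead of testing `j in s` for every (row, set) pair, and emits Mathematica brace syntax directly with joins instead of Python repr() followed by two whole-string character replacements.
import Mathlib
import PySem

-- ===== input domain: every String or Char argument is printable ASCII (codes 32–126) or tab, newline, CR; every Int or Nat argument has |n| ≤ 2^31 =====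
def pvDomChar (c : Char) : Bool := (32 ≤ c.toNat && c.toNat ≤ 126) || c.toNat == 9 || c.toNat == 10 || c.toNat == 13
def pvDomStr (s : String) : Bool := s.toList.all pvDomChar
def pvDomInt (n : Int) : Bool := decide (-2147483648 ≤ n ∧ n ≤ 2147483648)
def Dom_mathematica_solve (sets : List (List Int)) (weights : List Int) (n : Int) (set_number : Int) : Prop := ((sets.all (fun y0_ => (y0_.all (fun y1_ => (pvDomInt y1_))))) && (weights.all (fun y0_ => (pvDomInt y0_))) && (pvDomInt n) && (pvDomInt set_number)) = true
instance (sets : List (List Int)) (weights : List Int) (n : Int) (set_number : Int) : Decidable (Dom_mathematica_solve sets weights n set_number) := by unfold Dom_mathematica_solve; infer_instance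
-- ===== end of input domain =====

-- B builds the 0/1 matrix densely from the sparse set contents (no per-cell `j in s`
-- scan) and emits Mathematica brace syntax directly with joins instead of A's repr()
-- plus two character replacements (objective: alternative decomposition).

-- ===== PORT A =====
-- str(v) for a Python list of ints: '[' + ', '.join(str(x)) + ']' — exact char sequence
def pyStrIntList (xs : List Int) : String :=
  String.ofList ('[' :: PySem.Chars.join [',', ' '] (xs.map PySem.Int.toChars) ++ [']'])

-- str(v) for a Python list of lists of ints — exact char sequence
def pyStrIntMatrix (xss : List (List Int)) : String :=
  String.ofList ('[' :: PySem.Chars.join [',', ' '] (xss.map (fun xs => (pyStrIntList xs).toList)) ++ [']'])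

-- the nested helper `mize`
def mize (v : String) : String :=
  PySem.Str.replace (PySem.Str.replace v "[" "{") "]" "}"

def mathematica_solve (sets : List (List Int)) (weights : List Int) (n : Int) (set_number : Int) : String :=
  let A := (PySem.List.pyRange 1 (n+1) 1).map (fun j => sets.map (fun s => if j ∈ s then (1 : Int) else 0))
  let b := (PySem.List.pyRange 0 n 1).map (fun _ => (1 : Int))
  let c := weights
  let lu := (PySem.List.pyRange 0 set_number 1).map (fun _ => ([0, 1] : List Int))
  "\n        A = " ++ mize (pyStrIntMatrix A) ++ ";\n        c = " ++ mize (pyStrIntList c) ++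
    ";\n        b = " ++ mize (pyStrIntList b) ++ ";\n        LU = " ++ mize (pyStrIntMatrix lu) ++
    ";\n        LinearProgramming[c, A, b, LU, Integers]\n    "

-- ===== PORT B =====
def braceJoin (items : List String) : String :=
  "{" ++ PySem.Str.join ", " items ++ "}"

-- the two nested `for` loops filling M in place
def fillMatrix (n : Int) (sets : List (List Int)) (M : List (List String)) : List (List String) :=
  (PySem.List.enumerate sets 0).foldl
    (fun M p => p.2.foldl
      (fun M m => if 1 ≤ m ∧ m ≤ n then M.modify (m - 1).toNat (fun row => row.set p.1.toNat "1") else M)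
      M)
    M

def mathematica_solve_alt (sets : List (List Int)) (weights : List Int) (n : Int) (set_number : Int) : String :=
  let rows := (max n 0).toNat
  let M := fillMatrix n sets (List.replicate rows (List.replicate sets.length "0"))
  let aStr := braceJoin (M.map braceJoin)
  let cStr := braceJoin (weights.map PySem.Int.toStr)
  let bStr := braceJoin (List.replicate rows "1")
  let luStr := braceJoin (List.replicate (max set_number 0).toNat "{0, 1}")
  "\n        A = " ++ aStr ++ ";\n        c = " ++ cStr ++
    ";\n        b = " ++ bStr ++ ";\n        LU = " ++ luStr ++
    ";\n        LinearProgramming[c, A, b, LU, Integers]\n    "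

-- ===== PRECONDITION & SPEC =====
def Spec_mathematica_solve (sets : List (List Int)) (weights : List Int) (n : Int) (set_number : Int) (out : String) : Prop := out = mathematica_solve_alt sets weights n set_number
instance (sets : List (List Int)) (weights : List Int) (n : Int) (set_number : Int) (out : String) : Decidable (Spec_mathematica_solve sets weights n set_number out) := by unfold Spec_mathematica_solve; infer_instance

-- ===== CLAIM (what is proved, stated in full; the proofs are below) =====
def Claim_equal_mathematica_solve : Prop := ∀ (sets : List (List Int)) (weights : List Int) (n : Int) (set_number : Int), Dom_mathematica_solve sets weights n set_number → Spec_mathematica_solve sets weights n set_number (mathematica_solve sets weights n set_number)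

-- ===== LEMMAS AND PROOFS =====

-- the combined effect of the two single-char replaces in `mize`
def gmap (c : Char) : Char := if c = '[' then '{' else if c = ']' then '}' else c

theorem replace_go_single (oc nc : Char) :
    ∀ (fuel : Nat) (l acc : List Char), l.length ≤ fuel →
      PySem.Chars.replace.go [oc] [nc] fuel l acc
        = acc.reverse ++ l.map (fun c => if c = oc then nc else c) := by
  intro fuel
  induction fuel with
  | zero =>
    intro l acc h
    have : l = [] := List.eq_nil_of_length_eq_zero (Nat.le_zero.mp h)
    subst this
    simp [PySem.Chars.replace.go]
  | succ fuel ih =>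
    intro l acc h
    cases l with
    | nil => simp [PySem.Chars.replace.go]
    | cons c t =>
      by_cases hc : c = oc
      · subst hc
        have hpre : List.isPrefixOf [c] (c :: t) = true := by simp [List.isPrefixOf]
        have hstep : PySem.Chars.replace.go [c] [nc] (fuel + 1) (c :: t) acc
            = PySem.Chars.replace.go [c] [nc] fuel (List.drop 1 (c :: t)) (List.reverse [nc] ++ acc) := by
          simp [PySem.Chars.replace.go, hpre]
        rw [hstep]
        have hlen : (List.drop 1 (c :: t)).length ≤ fuel := by
          simp only [List.length_cons] at h
          simp only [List.length_drop, List.length_cons]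
          omega
        rw [ih (List.drop 1 (c :: t)) (List.reverse [nc] ++ acc) hlen]
        simp
      · have hpre : List.isPrefixOf [oc] (c :: t) = false := by
          simp [List.isPrefixOf]
          intro h'
          exact absurd h'.symm hc
        have hstep : PySem.Chars.replace.go [oc] [nc] (fuel + 1) (c :: t) acc
            = PySem.Chars.replace.go [oc] [nc] fuel t (c :: acc) := by
          simp [PySem.Chars.replace.go, hpre]
        rw [hstep, ih t (c :: acc) (Nat.le_of_succ_le_succ h)]
        simp [hc]

theorem replace_single (s : List Char) (oc nc : Char) :
    PySem.Chars.replace s [oc] [nc] = s.map (fun c => if c = oc then nc else c) := by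
  unfold PySem.Chars.replace
  simp [replace_go_single oc nc s.length s [] (le_refl _)]

theorem mize_toList (v : String) :
    (mize v).toList = v.toList.map gmap := by
  unfold mize
  simp only [PySem.Str.replace, String.toList_ofList]
  have h1 : ("[" : String).toList = ['['] := rfl
  have h2 : ("{" : String).toList = ['{'] := rfl
  have h3 : ("]" : String).toList = [']'] := rfl
  have h4 : ("}" : String).toList = ['}'] := rfl
  rw [h1, h2, h3, h4, replace_single, replace_single, List.map_map]
  apply List.map_congr_left
  intro c _
  by_cases hc : c = '['
  · subst hc; rfl
  · by_cases hc2 : c = ']' <;> simp [gmap, hc, hc2, Function.comp]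

theorem digitChar_lt (m : Nat) (h : m < 10) : (Nat.digitChar m).toNat < 60 := by
  interval_cases m <;> decide

theorem toDigitsCore_lt :
    ∀ (fuel n : Nat) (acc : List Char), (∀ c ∈ acc, c.toNat < 60) →
      ∀ c ∈ Nat.toDigitsCore 10 fuel n acc, c.toNat < 60 := by
  intro fuel
  induction fuel with
  | zero => intro n acc hacc c hc; exact hacc c (by simpa [Nat.toDigitsCore] using hc)
  | succ fuel ih =>
    intro n acc hacc c hc
    simp only [Nat.toDigitsCore] at hc
    by_cases h0 : n / 10 = 0
    · rw [if_pos h0] at hc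
      rcases List.mem_cons.mp hc with h | h
      · subst h; exact digitChar_lt _ (Nat.mod_lt _ (by norm_num))
      · exact hacc c h
    · rw [if_neg h0] at hc
      refine ih (n / 10) _ ?_ c hc
      intro c' hc'
      rcases List.mem_cons.mp hc' with h | h
      · subst h; exact digitChar_lt _ (Nat.mod_lt _ (by norm_num))
      · exact hacc c' h

theorem toChars_lt (i : Int) : ∀ c ∈ PySem.Int.toChars i, c.toNat < 60 := by
  intro c hc
  unfold PySem.Int.toChars at hc
  split at hc
  · rcases List.mem_cons.mp hc with h | h
    · subst h; decide
    · exact toDigitsCore_lt _ _ [] (by simp) c h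
  · exact toDigitsCore_lt _ _ [] (by simp) c hc

theorem gmap_of_lt {c : Char} (h : c.toNat < 60) : gmap c = c := by
  unfold gmap
  have h1 : c ≠ '[' := by intro he; subst he; simp at h
  have h2 : c ≠ ']' := by intro he; subst he; simp at h
  simp [h1, h2]

theorem map_gmap_join (parts : List (List Char)) :
    (PySem.Chars.join [',', ' '] parts).map gmap
      = PySem.Chars.join [',', ' '] (parts.map (List.map gmap)) := by
  induction parts with
  | nil => simp [PySem.Chars.join_nil]
  | cons p t ih =>
    cases t with
    | nil => simp [PySem.Chars.join_singleton]
    | cons q u =>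
      have hsep : List.map gmap [',', ' '] = [',', ' '] := by decide
      simp only [List.map_cons, PySem.Chars.join_cons_cons, List.map_append, hsep, ih]

theorem map_gmap_toChars (i : Int) :
    (PySem.Int.toChars i).map gmap = PySem.Int.toChars i := by
  apply List.map_congr_left ?_ |>.trans (List.map_id _)
  intro c hc
  exact gmap_of_lt (toChars_lt i c hc)

theorem braceJoin_toList (items : List String) :
    (braceJoin items).toList = '{' :: PySem.Chars.join [',', ' '] (items.map String.toList) ++ ['}'] := by
  unfold braceJoin
  simp only [String.toList_append, PySem.Str.join, String.toList_ofList]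
  rfl

theorem mize_list (xs : List Int) :
    mize (pyStrIntList xs) = braceJoin (xs.map PySem.Int.toStr) := by
  have : (mize (pyStrIntList xs)).toList = (braceJoin (xs.map PySem.Int.toStr)).toList := by
    rw [mize_toList, braceJoin_toList]
    unfold pyStrIntList
    simp only [String.toList_ofList, List.map_cons, List.map_append, map_gmap_join, List.map_map]
    have : (fun xs => String.toList (PySem.Int.toStr xs)) = PySem.Int.toChars := by
      funext i; exact PySem.Int.toList_toStr i
    simp [gmap, Function.comp_def, map_gmap_toChars]
  calc mize (pyStrIntList xs) = String.ofList (mize (pyStrIntList xs)).toList := (String.ofList_toList).symm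
    _ = String.ofList (braceJoin (xs.map PySem.Int.toStr)).toList := by rw [this]
    _ = braceJoin (xs.map PySem.Int.toStr) := String.ofList_toList

theorem mize_row_toList (xs : List Int) :
    ((pyStrIntList xs).toList).map gmap = (braceJoin (xs.map PySem.Int.toStr)).toList := by
  have h := congrArg String.toList (mize_list xs)
  rw [mize_toList] at h
  exact h

theorem mize_matrix (xss : List (List Int)) :
    mize (pyStrIntMatrix xss) = braceJoin (xss.map (fun xs => braceJoin (xs.map PySem.Int.toStr))) := by
  have : (mize (pyStrIntMatrix xss)).toList
      = (braceJoin (xss.map (fun xs => braceJoin (xs.map PySem.Int.toStr)))).toList := by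
    rw [mize_toList, braceJoin_toList]
    unfold pyStrIntMatrix
    simp only [String.toList_ofList, List.map_cons, List.map_append, map_gmap_join, List.map_map]
    simp [gmap, Function.comp_def, mize_row_toList]
  calc mize (pyStrIntMatrix xss) = String.ofList (mize (pyStrIntMatrix xss)).toList := (String.ofList_toList).symm
    _ = _ := by rw [this]
    _ = _ := String.ofList_toList

-- row-level view of the inner member loop
theorem inner_row (n : Int) (idx : Nat) (r : Nat) :
    ∀ (s : List Int) (M : List (List String)),
      (s.foldl (fun M m => if 1 ≤ m ∧ m ≤ n then M.modify (m - 1).toNat (fun row => row.set idx "1") else M) M)[r]?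
        = if ((r : Int) + 1) ∈ s ∧ ((r : Int) + 1 ≤ n) then M[r]?.map (fun row => row.set idx "1") else M[r]? := by
  intro s
  induction s with
  | nil => intro M; simp
  | cons m t ih =>
    intro M
    simp only [List.foldl_cons, ih]
    by_cases ht : ((r : Int) + 1) ∈ t ∧ ((r : Int) + 1 ≤ n)
    · rw [if_pos ht]
      have hall : ((r : Int) + 1) ∈ m :: t ∧ ((r : Int) + 1 ≤ n) :=
        ⟨List.mem_cons_of_mem _ ht.1, ht.2⟩
      by_cases hm : (1 : Int) ≤ m ∧ m ≤ n
      · rw [if_pos hm, List.getElem?_modify, if_pos hall]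
        by_cases he : (m - 1).toNat = r
        · have hfun : (fun a : List String => if (m - 1).toNat = r then a.set idx "1" else a)
              = (fun a : List String => a.set idx "1") := by
            funext a; rw [if_pos he]
          rw [hfun]
          cases M[r]? with
          | none => rfl
          | some row => simp [List.set_set]
        · have hfun : (fun a : List String => if (m - 1).toNat = r then a.set idx "1" else a)
              = (fun a : List String => a) := by
            funext a; rw [if_neg he]
          rw [hfun]
          cases M[r]? <;> rfl
      · rw [if_neg hm, if_pos hall]
    · rw [if_neg ht]
      by_cases hm : (1 : Int) ≤ m ∧ m ≤ n
      · rw [if_pos hm, List.getElem?_modify]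
        by_cases hr : ((r : Int) + 1) = m
        · have hall : ((r : Int) + 1) ∈ m :: t ∧ ((r : Int) + 1 ≤ n) := by
            constructor
            · rw [hr]; exact List.mem_cons_self
            · omega
          rw [if_pos hall]
          have hidx : (m - 1).toNat = r := by omega
          have hfun : (fun a : List String => if (m - 1).toNat = r then a.set idx "1" else a)
              = (fun a : List String => a.set idx "1") := by
            funext a; rw [if_pos hidx]
          rw [hfun]
          cases M[r]? <;> rfl
        · have hall : ¬ (((r : Int) + 1) ∈ m :: t ∧ ((r : Int) + 1 ≤ n)) := by
            intro hx
            rcases List.mem_cons.mp hx.1 with h | h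
            · exact hr h
            · exact ht ⟨h, hx.2⟩
          rw [if_neg hall]
          have hne : (m - 1).toNat ≠ r := by omega
          have hfun : (fun a : List String => if (m - 1).toNat = r then a.set idx "1" else a)
              = (fun a : List String => a) := by
            funext a; rw [if_neg hne]
          rw [hfun]
          cases M[r]? <;> rfl
      · rw [if_neg hm]
        have hall : ¬ (((r : Int) + 1) ∈ m :: t ∧ ((r : Int) + 1 ≤ n)) := by
          intro hx
          rcases List.mem_cons.mp hx.1 with h | h
          · omega
          · exact ht ⟨h, hx.2⟩
        rw [if_neg hall]

-- sequential single-column updates of one row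
def rowUpd (n : Int) (r : Nat) : List (List Int) → Nat → List String → List String
  | [], _, row => row
  | s :: t, k, row =>
      rowUpd n r t (k + 1) (if ((r : Int) + 1) ∈ s ∧ ((r : Int) + 1 ≤ n) then row.set k "1" else row)

theorem outer_row (n : Int) (r : Nat) :
    ∀ (sets : List (List Int)) (k : Nat) (M : List (List String)),
      ((PySem.List.enumerate sets (k : Int)).foldl
        (fun M p => p.2.foldl
          (fun M m => if 1 ≤ m ∧ m ≤ n then M.modify (m - 1).toNat (fun row => row.set p.1.toNat "1") else M) M)
        M)[r]?
      = M[r]?.map (fun row => rowUpd n r sets k row) := by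
  intro sets
  induction sets with
  | nil => intro k M; simp [PySem.List.enumerate, rowUpd]
  | cons s t ih =>
    intro k M
    rw [PySem.List.enumerate_cons]
    simp only [List.foldl_cons, Int.toNat_natCast]
    have hcast : ((k : Int) + 1) = ((k + 1 : Nat) : Int) := by push_cast; ring
    rw [hcast, ih]
    rw [inner_row n k r s M]
    by_cases hc : ((r : Int) + 1) ∈ s ∧ ((r : Int) + 1 ≤ n)
    · rw [if_pos hc]
      cases M[r]? with
      | none => rfl
      | some row =>
        simp only [Option.map_some, rowUpd]
        rw [if_pos hc]
    · rw [if_neg hc]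
      cases M[r]? with
      | none => rfl
      | some row =>
        simp only [Option.map_some, rowUpd]
        rw [if_neg hc]

theorem rowUpd_spec (n : Int) (r : Nat) (hn : ((r : Int) + 1) ≤ n) :
    ∀ (sets : List (List Int)) (k : Nat) (row : List String),
      k + sets.length ≤ row.length →
      (∀ i, i < sets.length → row[k + i]? = some "0") →
      rowUpd n r sets k row
        = row.take k ++ sets.map (fun s => if ((r : Int) + 1) ∈ s then "1" else "0")
            ++ row.drop (k + sets.length) := by
  intro sets
  induction sets with
  | nil => intro k row _ _; simp [rowUpd]
  | cons s t ih =>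
    intro k row hlen h0
    have hk : k < row.length := by simp at hlen; omega
    simp only [rowUpd]
    set row' := if ((r : Int) + 1) ∈ s ∧ ((r : Int) + 1 ≤ n) then row.set k "1" else row with hrow'
    have hlen' : row'.length = row.length := by
      rw [hrow']; split <;> simp
    have hrec := ih (k + 1) row' (by simp at hlen ⊢; omega) ?_
    · rw [hrec]
      have htake : row'.take (k + 1) = row.take k ++ [if ((r : Int) + 1) ∈ s then "1" else "0"] := by
        rw [List.take_add_one]
        have hget : row'[k]? = some (if ((r : Int) + 1) ∈ s then "1" else "0") := by
          rw [hrow']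
          by_cases hm : ((r : Int) + 1) ∈ s
          · rw [if_pos ⟨hm, hn⟩, List.getElem?_set_self hk, if_pos hm]
          · rw [if_neg (by tauto), if_neg hm]
            have := h0 0 (by simp)
            simpa using this
        have htk : row'.take k = row.take k := by
          rw [hrow']; split
          · rw [List.take_set, List.set_eq_of_length_le (by simp)]
          · rfl
        rw [hget, htk]; rfl
      have hdrop : row'.drop (k + 1 + t.length) = row.drop (k + (t.length + 1)) := by
        have harith : k + 1 + t.length = k + (t.length + 1) := by omega
        rw [hrow', harith]; split
        · rw [List.drop_set, if_pos (by omega)]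
        · rfl
      rw [htake, hdrop]
      simp [List.append_assoc]
    · intro i hi
      have hne : k ≠ k + 1 + i := by omega
      have : row'[k + 1 + i]? = row[k + 1 + i]? := by
        rw [hrow']; split
        · exact List.getElem?_set_ne hne
        · rfl
      rw [this]
      have := h0 (1 + i) (by simp; omega)
      simpa [Nat.add_assoc] using this

theorem fillMatrix_eq (n : Int) (sets : List (List Int)) :
    fillMatrix n sets (List.replicate (max n 0).toNat (List.replicate sets.length "0"))
      = (PySem.List.pyRange 1 (n + 1) 1).map
          (fun j => sets.map (fun s => if j ∈ s then "1" else "0")) := by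
  apply List.ext_getElem?
  intro r
  unfold fillMatrix
  have houter := outer_row (n := n) r sets 0 (List.replicate (max n 0).toNat (List.replicate sets.length "0"))
  simp only [Nat.cast_zero] at houter
  rw [houter]
  rw [PySem.List.pyRange_one]
  have hnt : (n + 1 - 1).toNat = (max n 0).toNat := by omega
  rw [hnt]
  by_cases hr : r < (max n 0).toNat
  · rw [List.getElem?_replicate, if_pos hr]
    have hn : ((r : Int) + 1) ≤ n := by omega
    have hspec := rowUpd_spec n r hn sets 0 (List.replicate sets.length "0")
      (by simp) (by intro i hi; simp [hi])
    simp only [Option.map_some]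
    rw [hspec]
    simp only [List.take_replicate, List.drop_replicate, Nat.zero_add, Nat.sub_self]
    simp only [List.getElem?_map, List.getElem?_range, hr, Option.map_some]
    rw [show ((r : Int) + 1) = (1 + (r : Int)) from by ring]
    simp
  · rw [List.getElem?_replicate, if_neg hr]
    rw [List.getElem?_eq_none (by simp; omega)]
    simp only [Option.map_none]

theorem toStr_ite (j : Int) (s : List Int) :
    PySem.Int.toStr (if j ∈ s then (1 : Int) else 0) = (if j ∈ s then "1" else "0") := by
  split <;> rfl

-- ===== VERDICT (by name: the statement is the Claim_ definition above) =====
set_option maxHeartbeats 1000000 in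
theorem mathematica_solve_spec : Claim_equal_mathematica_solve := by
  intro sets weights n set_number _
  unfold Spec_mathematica_solve mathematica_solve mathematica_solve_alt
  simp only
  have hA : mize (pyStrIntMatrix ((PySem.List.pyRange 1 (n + 1) 1).map
        (fun j => sets.map (fun s => if j ∈ s then (1 : Int) else 0))))
      = braceJoin ((fillMatrix n sets
          (List.replicate (max n 0).toNat (List.replicate sets.length "0"))).map braceJoin) := by
    rw [mize_matrix, fillMatrix_eq]
    congr 1
    simp only [List.map_map]
    apply List.map_congr_left
    intro j _
    simp only [Function.comp_def, List.map_map]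
    congr 1
    apply List.map_congr_left
    intro s _
    exact toStr_ite j s
  have hc : mize (pyStrIntList weights) = braceJoin (weights.map PySem.Int.toStr) :=
    mize_list weights
  have hb : mize (pyStrIntList ((PySem.List.pyRange 0 n 1).map (fun _ => (1 : Int))))
      = braceJoin (List.replicate (max n 0).toNat "1") := by
    rw [mize_list]
    congr 1
    rw [PySem.List.pyRange_one]
    simp only [List.map_map]
    apply List.eq_replicate_iff.mpr
    constructor
    · simp; omega
    · intro b hb
      simp at hb
      exact hb.2.symm
  have hlu : mize (pyStrIntMatrix ((PySem.List.pyRange 0 set_number 1).map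
        (fun _ => ([0, 1] : List Int))))
      = braceJoin (List.replicate (max set_number 0).toNat "{0, 1}") := by
    rw [mize_matrix]
    congr 1
    rw [PySem.List.pyRange_one]
    simp only [List.map_map]
    apply List.eq_replicate_iff.mpr
    constructor
    · simp; omega
    · intro b hb
      simp at hb
      rw [← hb.2]
      rfl
  rw [hA, hc, hb, hlu]
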